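-- pv_equiv track=rewrite | github.com/marcoaobatista/CSE231 | proj09/proj09.py | fill_completions
-- ===== SOURCE A (Python) =====
-- def fill_completions(words):
--     """
--     creates a dictionary with sets of words as values and tuples as keys in the
-- format (i,a) i for index and a the letter at index
--     words: set of words originated from a file (set)
--     return: dictionary in the format {(i,n): set(words)}
--     """
--     dictt = {}
--     for word in words:
--         for i, ch in enumerate(word):
--             # if key is in the dictionary, add word to value set
--             if (i,ch) in dictt:
--                 dictt[(i,ch)].add(word)
--             # otherwise create key value pair
--             else:
--                 dictt[(i,ch)] = {word}
--     return dictt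
-- ===== SOURCE B (Python) =====
-- def fill_completions(words):
--     # Two-phase: first collect the distinct (index, char) keys in first-occurrence
--     # order, then build each key's word set by a direct scan over the words.
--     keys = list(dict.fromkeys(((i, ch) for word in words for i, ch in enumerate(word))))
--     return {(i, ch): {w for w in words if i < len(w) and w[i] == ch}
--             for (i, ch) in keys}
-- ===== Notes on version B (the rewrite author's own statement) =====
-- stated objective: alternative
-- what changed: A builds the dict incrementally, inserting or updating a set per character while walking each word; B first materializes the distinct (index,char) keys in first-occurrence order and then computes each key's value by an independent scan over the words (i < len(w) and w[i] == ch), a keys-then-per-key-scan decomposition instead of insert-as-you-go.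
import Mathlib
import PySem

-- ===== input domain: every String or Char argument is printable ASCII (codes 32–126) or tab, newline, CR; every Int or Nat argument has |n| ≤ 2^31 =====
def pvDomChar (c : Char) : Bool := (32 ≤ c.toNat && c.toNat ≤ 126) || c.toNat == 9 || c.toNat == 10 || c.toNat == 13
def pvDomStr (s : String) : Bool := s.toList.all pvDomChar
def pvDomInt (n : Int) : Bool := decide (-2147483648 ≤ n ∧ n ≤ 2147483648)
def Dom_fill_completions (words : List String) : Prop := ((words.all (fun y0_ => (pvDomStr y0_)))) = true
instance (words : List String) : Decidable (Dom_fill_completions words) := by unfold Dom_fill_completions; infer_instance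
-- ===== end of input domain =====

-- B replaces A's incremental insert-as-you-go dict build by a two-phase keys-then-per-key-scan
-- decomposition (objective: alternative); same return value, proved below.


-- ===== PORT A =====
-- Python key (i, ch) as a Lean pair (Int, one-char String)
def pvKeyOf (p : Int × Char) : Int × String := (p.1, String.ofList [p.2])

-- one inner-loop step of A: the body of 'for i, ch in enumerate(word)'
-- (dictt[(i,ch)].add(word) mutates the stored set in place; modelled as overwrite-in-place
--  insert, which keeps the key's position — exactly Python's behaviour here)
def pvStepA (word : String) (d : PySem.Dict (Int × String) (List String)) (p : Int × Char) :
    PySem.Dict (Int × String) (List String) :=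
  if d.contains (pvKeyOf p) then
    d.insert (pvKeyOf p) (PySem.Set.add (d.getD (pvKeyOf p) []) word)
  else
    d.insert (pvKeyOf p) [word]

def fill_completions (words : List String) : List (Int × String × List String) :=
  ((words.foldl
      (fun d word => (PySem.List.enumerate word.toList).foldl (pvStepA word) d)
      PySem.Dict.empty).items).map (fun p => (p.1.1, p.1.2, p.2))

-- ===== PORT B =====
-- Source B's membership test 'i < len(w) and w[i] == ch' (i is always ≥ 0 here, where pyGet? is exact)
def pvOccurs (k : Int × String) (w : String) : Bool :=
  k.1 < PySem.Str.len w &&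
    (match PySem.Str.pyGet? w k.1 with
      | some c => String.ofList [c] == k.2
      | none => false)

def fill_completions_alt (words : List String) : List (Int × String × List String) :=
  let keys := PySem.List.dedup
    (words.flatMap (fun word => (PySem.List.enumerate word.toList).map pvKeyOf))
  keys.map (fun k => (k.1, k.2, PySem.Set.ofList (words.filter (fun w => pvOccurs k w))))

-- ===== PRECONDITION & SPEC =====
def Spec_fill_completions (words : List String) (out : List (Int × String × List String)) : Prop := out = fill_completions_alt words
instance (words : List String) (out : List (Int × String × List String)) : Decidable (Spec_fill_completions words out) := by unfold Spec_fill_completions; infer_instance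

-- ===== CLAIM (what is proved, stated in full; the proofs are below) =====
def Claim_equal_fill_completions : Prop := ∀ (words : List String), Dom_fill_completions words → Spec_fill_completions words (fill_completions words)

-- ===== LEMMAS AND PROOFS =====

-- the (index, char) keys of one word, in order
def pvKeysOf (w : String) : List (Int × String) :=
  (PySem.List.enumerate w.toList).map pvKeyOf

lemma pvKeysOf_nodup (w : String) : (pvKeysOf w).Nodup := by
  have h := PySem.List.pairwise_lt_enumerate w.toList 0
  have h2 : (pvKeysOf w).Pairwise (fun a b => a.1 < b.1) :=
    List.Pairwise.map pvKeyOf (fun p q hpq => hpq) h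
  exact h2.imp (fun {a b} hab => by intro he; rw [he] at hab; exact lt_irrefl _ hab)

lemma pvKeysOf_nonneg (k : Int × String) (v : String) (h : k ∈ pvKeysOf v) : 0 ≤ k.1 := by
  simp only [pvKeysOf, List.mem_map, PySem.List.mem_enumerate_iff] at h
  obtain ⟨p, ⟨j, hj, rfl⟩, rfl⟩ := h
  simp [pvKeyOf]

-- Source B's per-word test agrees with key membership (for the nonnegative indices the key list holds)
lemma pvMem_keysOf (k : Int × String) (w : String) (h0 : 0 ≤ k.1) :
    k ∈ pvKeysOf w ↔ pvOccurs k w = true := by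
  obtain ⟨i, s⟩ := k
  simp only [pvKeysOf, List.mem_map, PySem.List.mem_enumerate_iff, pvOccurs, pvKeyOf] at *
  constructor
  · rintro ⟨p, ⟨j, hj, rfl⟩, h⟩
    cases h
    simp only [PySem.Str.pyGet?_natCast, PySem.Str.len_eq, zero_add, Bool.and_eq_true,
      decide_eq_true_eq]
    refine ⟨by simpa using hj, by simp [List.getElem?_eq_getElem hj]⟩
  · intro h
    simp only [Bool.and_eq_true, decide_eq_true_eq] at h
    obtain ⟨hlt, hm⟩ := h
    lift i to Nat using h0
    rw [PySem.Str.len_eq] at hlt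
    rw [PySem.Str.pyGet?_natCast] at hm
    have hjl : i < w.toList.length := by exact_mod_cast hlt
    refine ⟨(i, w.toList[i]), ⟨i, hjl, by simp⟩, ?_⟩
    simp only [List.getElem?_eq_getElem hjl] at hm
    simp only [beq_iff_eq] at hm
    simp [hm]

-- A's inner loop, characterised over an arbitrary nodup key list
lemma pvInner_items (w : String) (ks : List (Int × String)) (hks : ks.Nodup)
    (d : PySem.Dict (Int × String) (List String)) (hd : d.keys.Nodup) :
    (ks.foldl (fun d' k => if d'.contains k then d'.insert k (PySem.Set.add (d'.getD k []) w)
                           else d'.insert k [w]) d).items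
      = d.items.map (fun p => if p.1 ∈ ks then (p.1, PySem.Set.add p.2 w) else p)
        ++ (ks.filter (fun k => !d.contains k)).map (fun k => (k, ([w] : List String))) := by
  induction ks generalizing d with
  | nil => simp
  | cons k ks ih =>
    obtain ⟨hk, hks'⟩ := List.nodup_cons.mp hks
    simp only [List.foldl_cons]
    by_cases hc : d.contains k = true
    · rw [if_pos hc]
      set d' := d.insert k (PySem.Set.add (d.getD k []) w) with hd'
      have hnd' : d'.keys.Nodup := PySem.Dict.nodup_keys_insert d k _ hd
      rw [ih hks' d' hnd']
      have hitems : d'.items = d.items.map (fun p => if (p.1 == k) = true then (k, PySem.Set.add (d.getD k []) w) else p) :=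
        PySem.Dict.items_insert_of_contains d _ hc
      rw [hitems, List.map_map]
      congr 1
      · apply List.map_congr_left
        intro p hp
        by_cases hpk : p.1 = k
        · have hget : d.getD k [] = p.2 := by
            obtain ⟨a, b⟩ := p
            simp only at hpk; subst hpk
            exact PySem.Dict.getD_of_mem_items d hp hd []
          simp [Function.comp, hpk, hk, hget]
        · simp [Function.comp, hpk]
      · rw [List.filter_cons_of_neg (by simp [hc])]
        congr 1
        apply List.filter_congr
        intro k' hk'
        have : k' ≠ k := fun h => hk (h ▸ hk')
        simp [hd', PySem.Dict.contains_insert, this]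
    · rw [if_neg hc]
      replace hc : d.contains k = false := by simpa using hc
      set d' := d.insert k ([w] : List String) with hd'
      have hnd' : d'.keys.Nodup := PySem.Dict.nodup_keys_insert d k _ hd
      rw [ih hks' d' hnd']
      have hitems : d'.items = d.items ++ [(k, ([w] : List String))] :=
        PySem.Dict.items_insert_of_not_contains d _ hc
      have hknotin : k ∉ d.keys := by
        intro hmem
        exact absurd ((PySem.Dict.contains_iff_mem_keys d k).mpr hmem) (by simp [hc])
      rw [hitems, List.map_append]
      have hmap : d.items.map (fun p => if p.1 ∈ ks then (p.1, PySem.Set.add p.2 w) else p)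
          = d.items.map (fun p => if p.1 ∈ k :: ks then (p.1, PySem.Set.add p.2 w) else p) := by
        apply List.map_congr_left
        intro p hp
        have : p.1 ≠ k := fun h => hknotin (h ▸ PySem.Dict.mem_keys_of_mem_items d hp)
        simp [List.mem_cons, this]
      rw [hmap]
      have hfilt : ks.filter (fun k' => !d'.contains k') = ks.filter (fun k' => !d.contains k') := by
        apply List.filter_congr
        intro k' hk'
        have : k' ≠ k := fun h => hk (h ▸ hk')
        simp [hd', PySem.Dict.contains_insert, this]
      rw [hfilt, List.filter_cons_of_pos (by simp [hc])]
      simp [hk]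

-- A's inner fold over enumerate is the generic fold over the word's key list
lemma pvInnerFold (w : String) (d : PySem.Dict (Int × String) (List String)) :
    (PySem.List.enumerate w.toList).foldl (pvStepA w) d
      = (pvKeysOf w).foldl (fun d' k => if d'.contains k then d'.insert k (PySem.Set.add (d'.getD k []) w)
                           else d'.insert k [w]) d := by
  rw [pvKeysOf, List.foldl_map]
  rfl

-- A's whole loop: the dict's items are one entry per distinct key in first-occurrence
-- order, whose value is the (deduplicated, in-order) list of words holding that key
lemma pvOuter (ws : List String) :
    (ws.foldl (fun d word => (PySem.List.enumerate word.toList).foldl (pvStepA word) d)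
        PySem.Dict.empty).items
      = (PySem.List.dedup (ws.flatMap pvKeysOf)).map
          (fun k => (k, PySem.Set.ofList (ws.filter (fun v => decide (k ∈ pvKeysOf v))))) := by
  induction ws using List.reverseRecOn with
  | nil => rfl
  | append_singleton ws w ih =>
    rw [List.foldl_append, List.foldl_cons, List.foldl_nil, pvInnerFold]
    set D := ws.foldl (fun d word => (PySem.List.enumerate word.toList).foldl (pvStepA word) d)
        PySem.Dict.empty with hD
    set K := PySem.List.dedup (ws.flatMap pvKeysOf) with hK
    have hKnd : K.Nodup := by
      rw [hK, PySem.List.dedup_eq_ofList]; exact PySem.Set.nodup_ofList _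
    have hkeys : D.keys = K := by
      show D.items.map (fun x => x.1) = K
      rw [ih, List.map_map]
      simp only [Function.comp_def]
      exact List.map_id _
    have hd : D.keys.Nodup := by rw [hkeys]; exact hKnd
    rw [pvInner_items w (pvKeysOf w) (pvKeysOf_nodup w) D hd, ih]
    -- RHS key list
    have hkeyside : PySem.List.dedup ((ws ++ [w]).flatMap pvKeysOf)
        = K ++ (pvKeysOf w).filter (fun k => !decide (k ∈ K)) := by
      rw [hK, PySem.List.dedup_eq_ofList, PySem.List.dedup_eq_ofList, List.flatMap_append,
          PySem.Set.ofList_append, PySem.Set.update_eq_append_filter]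
      congr 1
      rw [show List.flatMap pvKeysOf [w] = pvKeysOf w by simp,
          PySem.Set.ofList_eq_self_of_nodup _ (pvKeysOf_nodup w)]
      apply List.filter_congr
      intro k hk
      simp [PySem.Set.contains_eq_listContains]
    rw [hkeyside, List.map_append, List.map_map]
    congr 1
    · -- old keys
      apply List.map_congr_left
      intro k hkK
      by_cases hmem : k ∈ pvKeysOf w
      · have h2 : (ws ++ [w]).filter (fun v => decide (k ∈ pvKeysOf v))
            = ws.filter (fun v => decide (k ∈ pvKeysOf v)) ++ [w] := by
          rw [List.filter_append]; simp [hmem]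
        simp [Function.comp, hmem, h2, PySem.Set.ofList_append_singleton]
      · have h1 : (ws ++ [w]).filter (fun v => decide (k ∈ pvKeysOf v))
            = ws.filter (fun v => decide (k ∈ pvKeysOf v)) := by
          rw [List.filter_append]; simp [hmem]
        simp [Function.comp, hmem, h1]
    · -- new keys
      have hfilt : (pvKeysOf w).filter (fun k => !D.contains k)
          = (pvKeysOf w).filter (fun k => !decide (k ∈ K)) := by
        apply List.filter_congr
        intro k _
        rw [PySem.Dict.contains_eq_decide_mem_keys, hkeys]
      rw [hfilt]
      apply List.map_congr_left
      intro k hkf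
      obtain ⟨hkw, hknotK⟩ := List.mem_filter.mp hkf
      simp only [Bool.not_eq_true', decide_eq_false_iff_not] at hknotK
      have hempty : ws.filter (fun v => decide (k ∈ pvKeysOf v)) = [] := by
        rw [List.filter_eq_nil_iff]
        intro v hv
        simp only [decide_eq_true_eq]
        intro hkv
        refine absurd ?_ hknotK
        rw [hK]
        exact (PySem.List.mem_dedup _ _).mpr (List.mem_flatMap.mpr ⟨v, hv, hkv⟩)
      have hone : [w].filter (fun v => decide (k ∈ pvKeysOf v)) = [w] := by simp [hkw]
      rw [List.filter_append, hempty, List.nil_append, hone,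
          PySem.Set.ofList_eq_self_of_nodup _ (List.nodup_singleton w)]

-- ===== VERDICT (by name: the statement is the Claim_ definition above) =====
theorem fill_completions_spec : Claim_equal_fill_completions := by
  intro words _hdom
  show fill_completions words = fill_completions_alt words
  rw [fill_completions, fill_completions_alt, pvOuter, List.map_map]
  apply List.map_congr_left
  intro k hkK
  have h0 : 0 ≤ k.1 := by
    rw [PySem.List.dedup_eq_ofList] at hkK
    have := (PySem.Set.mem_ofList _ _).mp hkK
    obtain ⟨v, _, hkv⟩ := List.mem_flatMap.mp this
    exact pvKeysOf_nonneg k v hkv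
  have hfc : words.filter (fun v => decide (k ∈ pvKeysOf v)) = words.filter (fun w => pvOccurs k w) := by
    apply List.filter_congr
    intro v _
    simp [pvMem_keysOf k v h0]
  simp [Function.comp, hfc]
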